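-- pv_equiv track=rewrite | github.com/rschaeff/ecod_consistency_2026 | curator_changes/boundary_methods.py | _local_to_abs
-- ===== SOURCE A (Python) =====
-- def _local_to_abs(segments, local_pos):
--     """Convert a 1-based domain-local position to (chain, absolute_pos).
--
--     Returns (chain, abs_pos) tuple.
--     """
--     residues_consumed = 0
--     for chain, start, end in segments:
--         seg_len = end - start + 1
--         if residues_consumed + seg_len >= local_pos:
--             offset = local_pos - residues_consumed - 1
--             return (chain, start + offset)
--         residues_consumed += seg_len
--     return None
-- ===== SOURCE B (Python) =====
-- def _local_to_abs(segments, local_pos):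
--     """Convert a 1-based domain-local position to (chain, absolute_pos).
--
--     Builds an inclusive prefix-sum table of segment lengths, then locates the
--     first table entry >= local_pos and recovers the offset from the table.
--     """
--     cums = []
--     total = 0
--     for _, start, end in segments:
--         total += end - start + 1
--         cums.append(total)
--     i = 0
--     for cum in cums:
--         if cum >= local_pos:
--             chain, start, _ = segments[i]
--             prev = cums[i - 1] if i > 0 else 0
--             return (chain, start + (local_pos - prev - 1))
--         i += 1
--     return None
-- ===== Notes on version B (the rewrite author's own statement) =====
-- stated objective: alternative
-- what changed: Replaced the single-pass running-accumulator early-return scan with a precomputed inclusive prefix-sum table of segment lengths that is then searched for the first entry >= local_pos, recovering the offset from the table instead of from loop state.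
import Mathlib
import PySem

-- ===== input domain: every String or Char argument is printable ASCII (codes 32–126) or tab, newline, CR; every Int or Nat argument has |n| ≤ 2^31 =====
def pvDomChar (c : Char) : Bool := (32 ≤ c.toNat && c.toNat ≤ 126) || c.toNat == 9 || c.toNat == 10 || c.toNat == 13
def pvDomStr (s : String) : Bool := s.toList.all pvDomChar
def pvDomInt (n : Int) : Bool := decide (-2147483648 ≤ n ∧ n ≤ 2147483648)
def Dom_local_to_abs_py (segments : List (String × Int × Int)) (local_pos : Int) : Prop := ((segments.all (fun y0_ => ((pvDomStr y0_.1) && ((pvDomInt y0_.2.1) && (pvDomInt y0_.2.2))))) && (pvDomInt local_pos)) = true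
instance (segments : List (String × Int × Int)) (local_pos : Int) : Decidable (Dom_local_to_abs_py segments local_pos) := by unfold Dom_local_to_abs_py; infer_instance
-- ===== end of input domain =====

-- B replaces A's running-accumulator scan by a precomputed prefix-sum table that is then
-- searched for the first cumulative total ≥ local_pos (objective: alternative decomposition).

-- ===== PORT A =====
-- A's for-loop with the running accumulator `residues_consumed`, as structural recursion.
def aScan (segments : List (String × Int × Int)) (local_pos : Int) (residues_consumed : Int) :
    Option (String × Int) :=
  match segments with
  | [] => none
  | (chain, start, «end») :: rest =>
    let seg_len := «end» - start + 1
    if residues_consumed + seg_len ≥ local_pos then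
      some (chain, start + (local_pos - residues_consumed - 1))
    else
      aScan rest local_pos (residues_consumed + seg_len)

def local_to_abs_py (segments : List (String × Int × Int)) (local_pos : Int) : Option (String × Int) :=
  aScan segments local_pos 0

-- ===== PORT B =====
-- Source B's first loop: the inclusive prefix-sum table of segment lengths.
def prefixCums (segments : List (String × Int × Int)) (total : Int) : List Int :=
  match segments with
  | [] => []
  | (_, start, «end») :: rest =>
    (total + («end» - start + 1)) :: prefixCums rest (total + («end» - start + 1))

-- Source B's second loop: walk the table with counter i, stop at the first entry ≥ local_pos.
def bFind (segments : List (String × Int × Int)) (cums : List Int) (local_pos : Int) :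
    List Int → Nat → Option (String × Int)
  | [], _ => none
  | cum :: rest, i =>
    if cum ≥ local_pos then
      match PySem.List.pyGet? segments (Int.ofNat i) with
      | none => none  -- unreachable: i < cums.length = segments.length
      | some (chain, start, _) =>
        let prev := if i > 0 then cums.getD (i - 1) 0 else 0
        some (chain, start + (local_pos - prev - 1))
    else bFind segments cums local_pos rest (i + 1)

def local_to_abs_py_alt (segments : List (String × Int × Int)) (local_pos : Int) :
    Option (String × Int) :=
  let cums := prefixCums segments 0
  bFind segments cums local_pos cums 0

-- ===== PRECONDITION & SPEC =====
-- (no Pre_: the Python A is total — it returns on every well-typed input)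
def Spec_local_to_abs_py (segments : List (String × Int × Int)) (local_pos : Int)
    (out : Option (String × Int)) : Prop := out = local_to_abs_py_alt segments local_pos
instance (segments : List (String × Int × Int)) (local_pos : Int) (out : Option (String × Int)) :
    Decidable (Spec_local_to_abs_py segments local_pos out) := by
  unfold Spec_local_to_abs_py; infer_instance

-- ===== CLAIM (what is proved, stated in full; the proofs are below) =====
def Claim_equal_local_to_abs_py : Prop := ∀ (segments : List (String × Int × Int)) (local_pos : Int), Dom_local_to_abs_py segments local_pos → Spec_local_to_abs_py segments local_pos (local_to_abs_py segments local_pos)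

-- ===== LEMMAS AND PROOFS =====

theorem length_prefixCums (segments : List (String × Int × Int)) (t : Int) :
    (prefixCums segments t).length = segments.length := by
  induction segments generalizing t with
  | nil => simp [prefixCums]
  | cons p rest ih => obtain ⟨c, s, e⟩ := p; simp [prefixCums, ih]

-- the first index of C whose entry is ≥ x (C.length if none) — proof-side helper
def firstGE (C : List Int) (x : Int) : Nat :=
  match C with
  | [] => 0
  | c :: rest => if x ≤ c then 0 else firstGE rest x + 1

theorem firstGE_le_length (C : List Int) (x : Int) : firstGE C x ≤ C.length := by
  induction C with
  | nil => simp [firstGE]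
  | cons c rest ih =>
    simp only [firstGE, List.length_cons]
    split <;> omega

theorem firstGE_lt (C : List Int) (x : Int) :
    ∀ j : Nat, j < firstGE C x → C.getD j 0 < x := by
  induction C with
  | nil => intro j hj; simp [firstGE] at hj
  | cons c rest ih =>
    intro j hj
    simp only [firstGE] at hj
    by_cases hc : x ≤ c
    · simp [hc] at hj
    · rw [if_neg hc] at hj
      cases j with
      | zero => simpa using not_le.mp hc
      | succ j' => simpa using ih j' (by omega)

theorem firstGE_hit (C : List Int) (x : Int) :
    firstGE C x < C.length → x ≤ C.getD (firstGE C x) 0 := by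
  induction C with
  | nil => intro h; simp [firstGE] at h
  | cons c rest ih =>
    intro h
    simp only [firstGE] at h ⊢
    by_cases hc : x ≤ c
    · simpa [hc]
    · rw [if_neg hc] at h ⊢
      simpa using ih (by simpa using h)

-- A's scan, characterised by the first split index r of the prefix-sum list.
theorem aScan_eq_split (segments : List (String × Int × Int)) (local_pos t : Int) (r : Nat)
    (hr : r ≤ segments.length)
    (hlow : ∀ j : Nat, j < r → (prefixCums segments t).getD j 0 < local_pos)
    (hhit : r < segments.length → local_pos ≤ (prefixCums segments t).getD r 0) :
    aScan segments local_pos t =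
      if h : r < segments.length then
        some ((segments.get ⟨r, h⟩).1,
          (segments.get ⟨r, h⟩).2.1 +
            (local_pos - (if r = 0 then t else (prefixCums segments t).getD (r - 1) 0) - 1)) else
      none := by
  induction segments generalizing t r with
  | nil =>
    simp only [List.length_nil] at hr
    simp [aScan, show r = 0 from Nat.le_zero.mp hr]
  | cons p rest ih =>
    obtain ⟨c, s, e⟩ := p
    cases r with
    | zero =>
      have hx : local_pos ≤ t + (e - s + 1) := by
        simpa [prefixCums] using hhit (by simp)
      simp [aScan, show t + (e - s + 1) ≥ local_pos from hx]
    | succ r' =>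
      have hx : t + (e - s + 1) < local_pos := by
        simpa [prefixCums] using hlow 0 (Nat.succ_pos r')
      have hcond : ¬ (t + (e - s + 1) ≥ local_pos) := by omega
      simp only [aScan, hcond, if_neg, not_false_eq_true]
      rw [ih (t + (e - s + 1)) r' (by simpa using hr)
        (fun j hj => by simpa [prefixCums] using hlow (j + 1) (by omega))
        (fun hjl => by simpa [prefixCums] using hhit (by simpa using hjl))]
      by_cases hlt : r' < rest.length
      · have hlt' : r' + 1 < ((c, s, e) :: rest).length := by simpa using hlt
        simp only [hlt, dif_pos, hlt', List.get_cons_succ]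
        congr 2
        cases r' with
        | zero => simp [prefixCums]
        | succ r'' => simp [prefixCums]
      · simp [hlt]

-- B's table walk, characterised by the same split index.
theorem bFind_eq_split (segments : List (String × Int × Int)) (C : List Int) (local_pos : Int)
    (r : Nat) (hClen : C.length = segments.length)
    (hlow : ∀ j : Nat, j < r → C.getD j 0 < local_pos)
    (hhit : r < C.length → local_pos ≤ C.getD r 0) :
    ∀ (tail : List Int) (i0 : Nat), tail = C.drop i0 → i0 ≤ r →
      bFind segments C local_pos tail i0 =
        if h : r < segments.length then
          some ((segments.get ⟨r, h⟩).1,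
            (segments.get ⟨r, h⟩).2.1 +
              (local_pos - (if r = 0 then 0 else C.getD (r - 1) 0) - 1)) else
        none := by
  intro tail
  induction tail with
  | nil =>
    intro i0 hdrop hi0r
    have hlen : C.length ≤ i0 := List.drop_eq_nil_iff.mp hdrop.symm
    have : ¬ r < segments.length := by omega
    simp [bFind, this]
  | cons cum rest' ih =>
    intro i0 hdrop hi0r
    have hi0 : i0 < C.length := by
      by_contra hge
      rw [List.drop_eq_nil_of_le (by omega)] at hdrop
      exact List.cons_ne_nil cum rest' hdrop
    have hdecomp : C.drop i0 = C[i0] :: C.drop (i0 + 1) := List.drop_eq_getElem_cons hi0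
    rw [hdecomp] at hdrop
    have hcum : cum = C.getD i0 0 := by
      have := (List.cons.injEq ..).mp hdrop
      rw [this.1, List.getD_eq_getElem C 0 hi0]
    have hrest : rest' = C.drop (i0 + 1) := ((List.cons.injEq ..).mp hdrop).2
    by_cases hge : cum ≥ local_pos
    · have hir : i0 = r := by
        by_contra hne
        exact absurd (hcum ▸ hlow i0 (by omega)) (by omega)
      subst hir
      have hrlen : i0 < segments.length := by omega
      rw [bFind, if_pos hge]
      have hget : PySem.List.pyGet? segments (Int.ofNat i0) = some (segments.get ⟨i0, hrlen⟩) := by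
        rw [Int.ofNat_eq_natCast, PySem.List.pyGet?_natCast]
        simp [List.getElem?_eq_getElem hrlen]
      rw [hget]
      simp only [dif_pos hrlen]
      obtain ⟨c, s, e⟩ := segments.get ⟨i0, hrlen⟩
      congr 2
      by_cases h0 : i0 = 0
      · simp [h0]
      · simp [h0, Nat.pos_of_ne_zero h0]
    · have hir : i0 ≠ r := by
        intro h
        subst h
        have := hhit hi0
        omega
      rw [bFind, if_neg hge]
      exact ih (i0 + 1) hrest (by omega)

-- ===== VERDICT (by name: the statement is the Claim_ definition above) =====
theorem local_to_abs_py_spec : Claim_equal_local_to_abs_py := by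
  intro segments local_pos _hdom
  unfold Spec_local_to_abs_py local_to_abs_py
  have hClen : (prefixCums segments 0).length = segments.length := length_prefixCums segments 0
  rw [aScan_eq_split segments local_pos 0 (firstGE (prefixCums segments 0) local_pos)
    (by have := firstGE_le_length (prefixCums segments 0) local_pos; omega)
    (firstGE_lt (prefixCums segments 0) local_pos)
    (fun h => firstGE_hit (prefixCums segments 0) local_pos (by omega))]
  simp only [local_to_abs_py_alt]
  rw [bFind_eq_split segments (prefixCums segments 0) local_pos
    (firstGE (prefixCums segments 0) local_pos) hClen
    (firstGE_lt (prefixCums segments 0) local_pos)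
    (firstGE_hit (prefixCums segments 0) local_pos)
    (prefixCums segments 0) 0 (by simp) (Nat.zero_le _)]
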